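-- pv_equiv track=rewrite | github.com/KaspijaALT/osint-wordlist-generator | script.py | estimate_count
-- ===== SOURCE A (Python) =====
-- import math
-- from typing import Iterable, List, Set, Tuple
--
-- def estimate_count(token_pool: List[str],
--                    max_concat: int,
--                    separators: List[str],
--                    years: List[str],
--                    prefixes: List[str],
--                    suffixes: List[str],
--                    case_modes: List[str],
--                    per_letter_allcase_len: int,
--                    mode: str,
--                    allow_repeat: bool) -> int:
--     """
--     Rough combinatorial estimate (may be high for allcases).
--     mode: 'permutation' or 'product'
--     allow_repeat: product = with repetition; permutation = without repetition
--     """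
--     base = len(token_pool)
--     if base == 0:
--         return 0
--     token_combo_count = 0
--     if mode == 'product':
--         for L in range(1, max_concat+1):
--             token_combo_count += (base ** L)
--     else:  # permutations without repetition
--         for L in range(1, min(max_concat, base)+1):
--             token_combo_count += math.perm(base, L) if hasattr(math, 'perm') else math.factorial(base)//math.factorial(base-L)
--     # separators multiply choices
--     sep_count = len(separators)
--     # years optional (including empty)
--     year_count = max(1, 1 + len(years))
--     pre_count = max(1, len(prefixes))
--     suf_count = max(1, len(suffixes))
--     # case expansion: approximate
--     case_mult = 1
--     # if allcases in modes, estimate worst-case 2^n for short tokens - we approximate by 4x multiplier for safety (user warned)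
--     if 'allcases' in case_modes:
--         case_mult = 4
--     else:
--         case_mult = len(set(case_modes)) if case_modes else 1
--     est = token_combo_count * sep_count * year_count * pre_count * suf_count * case_mult
--     return est
-- ===== SOURCE B (Python) =====
-- def estimate_count(token_pool,
--                    max_concat,
--                    separators,
--                    years,
--                    prefixes,
--                    suffixes,
--                    case_modes,
--                    per_letter_allcase_len,
--                    mode,
--                    allow_repeat):
--     base = len(token_pool)
--     if base == 0:
--         return 0
--     if mode == 'product':
--         # closed-form geometric sum of base**1 + ... + base**max_concat
--         if max_concat <= 0:
--             combos = 0
--         elif base == 1: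
--             combos = max_concat
--         else:
--             combos = (base ** (max_concat + 1) - base) // (base - 1)
--     else:
--         # running falling-factorial product instead of per-term math.perm
--         combos = 0
--         p = 1
--         for i in range(min(max_concat, base)):
--             p *= base - i
--             combos += p
--     if 'allcases' in case_modes:
--         case_mult = 4
--     else:
--         case_mult = len(set(case_modes)) or 1
--     return (combos * len(separators) * (1 + len(years))
--             * max(1, len(prefixes)) * max(1, len(suffixes)) * case_mult)
-- ===== Notes on version B (the rewrite author's own statement) =====
-- stated objective: alternative
-- what changed: The product branch's summation loop is replaced by the closed-form geometric sum (base**(m+1)-base)//(base-1), and the permutation branch's per-term math.perm calls are replaced by a single running falling-factorial product accumulated in one pass.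
import Mathlib
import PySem

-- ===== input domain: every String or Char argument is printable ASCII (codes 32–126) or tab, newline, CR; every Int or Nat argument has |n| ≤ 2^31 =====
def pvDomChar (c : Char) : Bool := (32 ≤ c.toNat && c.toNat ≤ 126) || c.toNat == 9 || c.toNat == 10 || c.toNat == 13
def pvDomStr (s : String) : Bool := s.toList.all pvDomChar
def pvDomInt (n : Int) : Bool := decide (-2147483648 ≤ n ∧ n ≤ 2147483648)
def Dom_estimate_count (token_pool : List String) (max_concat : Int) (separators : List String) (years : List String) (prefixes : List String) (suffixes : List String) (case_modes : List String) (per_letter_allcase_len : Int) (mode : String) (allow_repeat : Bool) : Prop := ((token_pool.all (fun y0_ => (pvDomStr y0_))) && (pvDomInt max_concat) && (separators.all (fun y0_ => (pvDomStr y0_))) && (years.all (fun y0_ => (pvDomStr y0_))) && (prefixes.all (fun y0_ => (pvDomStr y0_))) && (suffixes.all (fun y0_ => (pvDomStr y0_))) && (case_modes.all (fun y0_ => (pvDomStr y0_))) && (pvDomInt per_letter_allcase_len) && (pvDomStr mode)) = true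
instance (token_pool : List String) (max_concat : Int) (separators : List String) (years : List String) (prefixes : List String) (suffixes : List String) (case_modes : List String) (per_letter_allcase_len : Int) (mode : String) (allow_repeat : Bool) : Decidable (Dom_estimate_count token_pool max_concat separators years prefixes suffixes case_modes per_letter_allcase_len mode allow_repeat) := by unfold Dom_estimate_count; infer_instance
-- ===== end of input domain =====

-- B replaces the product-branch summation loop by the closed-form geometric sum and the
-- permutation branch's per-term factorial quotients by one running falling-factorial product.

-- ===== PORT A =====
def estimate_count (token_pool : List String) (max_concat : Int) (separators : List String) (years : List String) (prefixes : List String) (suffixes : List String) (case_modes : List String) (per_letter_allcase_len : Int) (mode : String) (allow_repeat : Bool) : Int :=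
  let base : Int := token_pool.length
  if base = 0 then 0
  else
    let token_combo_count : Int :=
      if mode = "product" then
        -- for L in range(1, max_concat+1): acc += base ** L   (L ≥ 1 in the range, so .toNat is exact)
        (PySem.List.pyRange 1 (max_concat + 1) 1).foldl (fun acc L => acc + base ^ L.toNat) 0
      else
        -- math.perm(base, L) = base! / (base-L)!  (hasattr(math,'perm') is True; 1 ≤ L ≤ base so exact)
        (PySem.List.pyRange 1 (min max_concat base + 1) 1).foldl
          (fun acc L => acc + ((Nat.factorial token_pool.length / Nat.factorial (token_pool.length - L.toNat) : Nat) : Int)) 0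
    let sep_count : Int := separators.length
    let year_count : Int := max 1 (1 + (years.length : Int))
    let pre_count : Int := max 1 ((prefixes.length : Int))
    let suf_count : Int := max 1 ((suffixes.length : Int))
    let case_mult : Int :=
      if case_modes.contains "allcases" then 4
      else if case_modes ≠ [] then ((PySem.Set.ofList case_modes).length : Int) else 1
    token_combo_count * sep_count * year_count * pre_count * suf_count * case_mult

-- ===== PORT B =====
def estimate_count_alt (token_pool : List String) (max_concat : Int) (separators : List String) (years : List String) (prefixes : List String) (suffixes : List String) (case_modes : List String) (per_letter_allcase_len : Int) (mode : String) (allow_repeat : Bool) : Int :=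
  let base : Int := token_pool.length
  if base = 0 then 0
  else
    let combos : Int :=
      if mode = "product" then
        if max_concat ≤ 0 then 0
        else if base = 1 then max_concat
        else PySem.Int.floordiv (base ^ (max_concat + 1).toNat - base) (base - 1)
      else
        -- p *= base - i; combos += p   over range(min(max_concat, base)), state (combos, p)
        ((PySem.List.pyRange 0 (min max_concat base) 1).foldl
          (fun (st : Int × Int) i => (st.1 + st.2 * (base - i), st.2 * (base - i))) (0, 1)).1
    let case_mult : Int :=
      if case_modes.contains "allcases" then 4
      else
        let n : Int := ((PySem.Set.ofList case_modes).length : Int)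
        if n = 0 then 1 else n
    combos * (separators.length : Int) * (1 + (years.length : Int))
      * max 1 ((prefixes.length : Int)) * max 1 ((suffixes.length : Int)) * case_mult

-- ===== PRECONDITION & SPEC =====
def Spec_estimate_count (token_pool : List String) (max_concat : Int) (separators : List String) (years : List String) (prefixes : List String) (suffixes : List String) (case_modes : List String) (per_letter_allcase_len : Int) (mode : String) (allow_repeat : Bool) (out : Int) : Prop := out = estimate_count_alt token_pool max_concat separators years prefixes suffixes case_modes per_letter_allcase_len mode allow_repeat
instance (token_pool : List String) (max_concat : Int) (separators : List String) (years : List String) (prefixes : List String) (suffixes : List String) (case_modes : List String) (per_letter_allcase_len : Int) (mode : String) (allow_repeat : Bool) (out : Int) : Decidable (Spec_estimate_count token_pool max_concat separators years prefixes suffixes case_modes per_letter_allcase_len mode allow_repeat out) := by unfold Spec_estimate_count; infer_instance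

-- ===== CLAIM =====
def Claim_equal_estimate_count : Prop := ∀ (token_pool : List String) (max_concat : Int) (separators : List String) (years : List String) (prefixes : List String) (suffixes : List String) (case_modes : List String) (per_letter_allcase_len : Int) (mode : String) (allow_repeat : Bool), Dom_estimate_count token_pool max_concat separators years prefixes suffixes case_modes per_letter_allcase_len mode allow_repeat → Spec_estimate_count token_pool max_concat separators years prefixes suffixes case_modes per_letter_allcase_len mode allow_repeat (estimate_count token_pool max_concat separators years prefixes suffixes case_modes per_letter_allcase_len mode allow_repeat)

-- ===== LEMMAS AND PROOFS =====

-- geometric sum times (b-1), by induction over the range length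
lemma geom_mul (b : Int) : ∀ (n : Nat),
    (((PySem.List.pyRange 1 ((n : Int) + 1) 1).foldl (fun acc L => acc + b ^ L.toNat) 0) * (b - 1))
      = b ^ (n + 1) - b := by
  intro n
  induction n with
  | zero => simp [PySem.List.pyRange_one_eq_nil (by omega : (0:Int) + 1 ≤ (1:Int))]
  | succ n ih =>
      have h : PySem.List.pyRange 1 (((n:Nat)+1 : Int) + 1) 1
          = PySem.List.pyRange 1 ((n : Int) + 1) 1 ++ [(n : Int) + 1] := by
        have := PySem.List.pyRange_one_succ_right (a := 1) (b := (n : Int) + 1) (by omega)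
        simpa using this
      rw [show (((n:Nat)+1 : Nat) : Int) = (n : Int) + 1 by push_cast; ring] at *
      rw [h, List.foldl_append]
      simp only [List.foldl]
      have ht : ((n : Int) + 1).toNat = n + 1 := by omega
      rw [ht]
      ring_nf
      ring_nf at ih
      nlinarith [ih]

lemma geom_one : ∀ (n : Nat),
    ((PySem.List.pyRange 1 ((n : Int) + 1) 1).foldl (fun acc L => acc + (1:Int) ^ L.toNat) 0) = n := by
  intro n
  induction n with
  | zero => simp [PySem.List.pyRange_one_eq_nil (by omega : (0:Int) + 1 ≤ (1:Int))]
  | succ n ih =>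
      have h : PySem.List.pyRange 1 (((n:Nat)+1 : Int) + 1) 1
          = PySem.List.pyRange 1 ((n : Int) + 1) 1 ++ [(n : Int) + 1] := by
        have := PySem.List.pyRange_one_succ_right (a := 1) (b := (n : Int) + 1) (by omega)
        simpa using this
      rw [show (((n:Nat)+1 : Nat) : Int) = (n : Int) + 1 by push_cast; ring]
      rw [h, List.foldl_append]
      simp only [List.foldl]
      rw [ih, one_pow]

-- the permutation-branch invariant: B's running (sum, product) state equals
-- (A's partial sum, base!/(base-n)!) after n steps
lemma perm_inv (base : Nat) : ∀ (n : Nat), n ≤ base →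
    ((PySem.List.pyRange 0 (n : Int) 1).foldl
        (fun (st : Int × Int) i => (st.1 + st.2 * ((base : Int) - i), st.2 * ((base : Int) - i))) (0, 1))
      = ( (PySem.List.pyRange 1 ((n : Int) + 1) 1).foldl
            (fun acc L => acc + ((Nat.factorial base / Nat.factorial (base - L.toNat) : Nat) : Int)) 0
        , ((Nat.factorial base / Nat.factorial (base - n) : Nat) : Int) ) := by
  intro n
  induction n with
  | zero =>
      intro _
      simp [PySem.List.pyRange_one_eq_nil (by omega : (0:Int) ≤ 0),
            Nat.div_self (Nat.factorial_pos base)]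
  | succ n ih =>
      intro hle
      have hn : n ≤ base := Nat.le_of_succ_le hle
      have hB : PySem.List.pyRange 0 (((n:Nat)+1 : Nat) : Int) 1
          = PySem.List.pyRange 0 (n : Int) 1 ++ [(n : Int)] := by
        have := PySem.List.pyRange_one_succ_right (a := 0) (b := (n : Int)) (by omega)
        simpa [show (((n:Nat)+1 : Nat) : Int) = (n : Int) + 1 by push_cast; ring] using this
      have hA : PySem.List.pyRange 1 ((((n:Nat)+1 : Nat) : Int) + 1) 1
          = PySem.List.pyRange 1 ((n : Int) + 1) 1 ++ [(n : Int) + 1] := by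
        have := PySem.List.pyRange_one_succ_right (a := 1) (b := (n : Int) + 1) (by omega)
        simpa [show (((n:Nat)+1 : Nat) : Int) = (n : Int) + 1 by push_cast; ring] using this
      rw [hB, hA, List.foldl_append, List.foldl_append, ih hn]
      simp only [List.foldl]
      have ht : ((n : Int) + 1).toNat = n + 1 := by omega
      -- key factorial step: base!/(base-n)! * (base-n) = base!/(base-(n+1))!
      obtain ⟨q, hq⟩ := Nat.factorial_dvd_factorial (Nat.sub_le base n)
      have hdn : base - n = (base - (n + 1)) + 1 := by omega
      have hq' : Nat.factorial base = (Nat.factorial (base - (n + 1)) * (base - n)) * q := by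
        rw [hq, hdn, Nat.factorial_succ]; ring_nf
      have hpos : 0 < base - n := by omega
      have e1 : Nat.factorial base / Nat.factorial (base - n) = q := by
        rw [hq]; exact Nat.mul_div_cancel_left q (Nat.factorial_pos _)
      have e2 : Nat.factorial base / Nat.factorial (base - (n + 1)) = (base - n) * q := by
        rw [hq']
        rw [Nat.mul_assoc]
        rw [Nat.mul_div_cancel_left _ (Nat.factorial_pos _)]
      have hcast : ((base : Int) - (n : Int)) = ((base - n : Nat) : Int) := by
        push_cast [Nat.cast_sub hn]; ring
      simp only [Prod.mk.injEq]
      constructor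
      · rw [ht, e1, e2, hcast]; push_cast; ring
      · rw [e1, e2, hcast]; push_cast; ring

-- a Python set of a nonempty list is nonempty
lemma ofList_len_zero_iff {α : Type} [BEq α] [LawfulBEq α] (xs : List α) :
    (PySem.Set.ofList xs).length = 0 ↔ xs = [] := by
  constructor
  · intro h
    cases xs with
    | nil => rfl
    | cons a t =>
        exfalso
        have : a ∈ PySem.Set.ofList (a :: t) := (PySem.Set.mem_ofList _ _).2 (List.mem_cons_self)
        have := List.length_pos_of_mem this
        omega
  · intro h; subst h; rfl

-- ===== VERDICT =====
theorem estimate_count_spec : Claim_equal_estimate_count := by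
  unfold Claim_equal_estimate_count
  intro token_pool max_concat separators years prefixes suffixes case_modes per_letter_allcase_len mode allow_repeat _
  unfold Spec_estimate_count estimate_count estimate_count_alt
  by_cases h0 : (token_pool.length : Int) = 0
  · simp [h0]
  · simp only [h0, if_false]
    have hb1 : 1 ≤ (token_pool.length : Int) := by
      have : 0 < token_pool.length := by omega
      omega
    -- the glue multipliers agree
    have hyear : max 1 (1 + (years.length : Int)) = 1 + (years.length : Int) := by omega
    have hcase :
        (if case_modes.contains "allcases" then (4:Int)
         else if case_modes ≠ [] then ((PySem.Set.ofList case_modes).length : Int) else 1)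
      = (if case_modes.contains "allcases" then (4:Int)
         else if ((PySem.Set.ofList case_modes).length : Int) = 0 then 1
              else ((PySem.Set.ofList case_modes).length : Int)) := by
      by_cases hc : "allcases" ∈ case_modes
      · simp [hc]
      · by_cases he : case_modes = []
        · simp [he, PySem.Set.ofList]
        · have hnil : PySem.Set.ofList case_modes ≠ [] := by
            intro h
            exact he ((ofList_len_zero_iff case_modes).1 (by simp [h]))
          simp [hc, he, hnil]
    rw [hyear, hcase]
    -- the token-combination counts agree
    have hcombo :
        (if mode = "product" then
          (PySem.List.pyRange 1 (max_concat + 1) 1).foldl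
            (fun acc L => acc + (token_pool.length : Int) ^ L.toNat) 0
         else
          (PySem.List.pyRange 1 (min max_concat (token_pool.length : Int) + 1) 1).foldl
            (fun acc L => acc + ((Nat.factorial token_pool.length / Nat.factorial (token_pool.length - L.toNat) : Nat) : Int)) 0)
      = (if mode = "product" then
          (if max_concat ≤ 0 then 0
           else if (token_pool.length : Int) = 1 then max_concat
           else PySem.Int.floordiv ((token_pool.length : Int) ^ (max_concat + 1).toNat - (token_pool.length : Int)) ((token_pool.length : Int) - 1))
         else
          ((PySem.List.pyRange 0 (min max_concat (token_pool.length : Int)) 1).foldl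
            (fun (st : Int × Int) i => (st.1 + st.2 * ((token_pool.length : Int) - i), st.2 * ((token_pool.length : Int) - i))) (0, 1)).1) := by
      by_cases hm : mode = "product"
      · simp only [hm, if_true]
        by_cases hmc : max_concat ≤ 0
        · rw [PySem.List.pyRange_one_eq_nil (by omega : max_concat + 1 ≤ 1)]
          simp [hmc]
        · simp only [hmc, if_false]
          set b : Int := (token_pool.length : Int) with hbdef
          obtain ⟨n, hn⟩ : ∃ n : Nat, max_concat = (n : Int) :=
            ⟨max_concat.toNat, by omega⟩
          subst hn
          by_cases hb : b = 1
          · rw [hb]; exact geom_one n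
          · simp only [hb, if_false]
            have hb2 : 2 ≤ b := by omega
            have hg := geom_mul b n
            have hpos : (0:Int) < b - 1 := by omega
            rw [PySem.Int.floordiv_eq_ediv_of_pos hpos]
            have ht : ((n : Int) + 1).toNat = n + 1 := by omega
            rw [ht]
            rw [← hg]
            exact (Int.mul_ediv_cancel _ (by omega)).symm
      · simp only [hm, if_false]
        set b : Int := (token_pool.length : Int) with hbdef
        by_cases hk : min max_concat b ≤ 0
        · rw [PySem.List.pyRange_one_eq_nil (by omega : min max_concat b + 1 ≤ 1),
              PySem.List.pyRange_one_eq_nil (by omega : min max_concat b ≤ 0)]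
          simp
        · obtain ⟨n, hn⟩ : ∃ n : Nat, min max_concat b = (n : Int) :=
            ⟨(min max_concat b).toNat, by omega⟩
          have hnb : n ≤ token_pool.length := by
            have : min max_concat b ≤ b := min_le_right _ _
            omega
          rw [hn]
          rw [perm_inv token_pool.length n hnb]
    rw [hcombo]
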